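-- pv_equiv track=rewrite | github.com/knagamatsu/simple-docking | backend/app/main.py | pdb_text_to_pdbqt
-- ===== SOURCE A (Python) =====
-- def pdb_text_to_pdbqt(pdb_text: str) -> str:
--     lines = []
--     for line in pdb_text.splitlines():
--         record = line[0:6].strip()
--         if record == "ATOM":
--             lines.append(line)
--         elif record == "END":
--             lines.append("END")
--             break
--     if not lines:
--         raise ValueError("No ATOM records found for PDBQT conversion")
--     if lines[-1] != "END":
--         lines.append("END")
--     return "\n".join(lines) + "\n"
-- ===== SOURCE B (Python) =====
-- def pdb_text_to_pdbqt(pdb_text: str) -> str: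
--     all_lines = pdb_text.splitlines()
--     end_idx = next((i for i, l in enumerate(all_lines) if l[0:6].strip() == "END"), None)
--     prefix = all_lines if end_idx is None else all_lines[:end_idx]
--     lines = [l for l in prefix if l[0:6].strip() == "ATOM"]
--     if end_idx is not None:
--         lines.append("END")
--     if not lines:
--         raise ValueError("No ATOM records found for PDBQT conversion")
--     if lines[-1] != "END":
--         lines.append("END")
--     return "\n".join(lines) + "\n"
-- ===== Notes on version B (the rewrite author's own statement) =====
-- stated objective: alternative
-- what changed: Replaces A's single fused loop with break by two separate passes: first locate the index of the first END record, then filter ATOM records from the prefix before it and append the normalized END literal if one was found.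
import Mathlib
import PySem

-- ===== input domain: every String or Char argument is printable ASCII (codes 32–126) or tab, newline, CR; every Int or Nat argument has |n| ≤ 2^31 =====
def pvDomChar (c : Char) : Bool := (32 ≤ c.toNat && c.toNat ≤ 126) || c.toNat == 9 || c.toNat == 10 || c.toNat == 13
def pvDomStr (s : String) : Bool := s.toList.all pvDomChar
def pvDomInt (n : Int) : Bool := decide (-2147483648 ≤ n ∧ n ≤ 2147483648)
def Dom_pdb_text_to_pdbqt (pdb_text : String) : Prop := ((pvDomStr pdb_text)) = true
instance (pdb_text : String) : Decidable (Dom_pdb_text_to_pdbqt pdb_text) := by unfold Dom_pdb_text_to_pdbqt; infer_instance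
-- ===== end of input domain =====

-- B replaces A's fused filter-with-break loop by two passes (find the first END record, then filter
-- ATOM records from the prefix before it); return values proved equal on Pre_ (where A does not raise).

-- ===== PORT A =====
-- the for-loop with break, accumulating `lines`
def pdbLoopA : List String → List String
  | [] => []
  | l :: ls =>
    let record := PySem.Str.strip (PySem.Str.slice l (some 0) (some 6))
    if record == "ATOM" then l :: pdbLoopA ls
    else if record == "END" then ["END"]
    else pdbLoopA ls

def pdb_text_to_pdbqt (pdb_text : String) : String :=
  let lines := pdbLoopA (PySem.Str.splitlines pdb_text)
  if lines = [] then ""  -- Python raises ValueError here; excluded by Pre_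
  else
    let lines := if lines.getLast? ≠ some "END" then lines ++ ["END"] else lines
    PySem.Str.join "\n" lines ++ "\n"

-- ===== PORT B =====
-- index of the first line whose record is "END" (the next(...) over enumerate)
def pdbEndIdx : List String → Option Nat
  | [] => none
  | l :: ls =>
    if PySem.Str.strip (PySem.Str.slice l (some 0) (some 6)) == "END" then some 0
    else (pdbEndIdx ls).map (· + 1)

def pdb_text_to_pdbqt_alt (pdb_text : String) : String :=
  let all_lines := PySem.Str.splitlines pdb_text
  let end_idx := pdbEndIdx all_lines
  let prefx := match end_idx with | none => all_lines | some i => all_lines.take i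
  let lines := prefx.filter (fun l => PySem.Str.strip (PySem.Str.slice l (some 0) (some 6)) == "ATOM")
  let lines := match end_idx with | none => lines | some _ => lines ++ ["END"]
  if lines = [] then ""  -- Python raises ValueError here; excluded by Pre_
  else
    let lines := if lines.getLast? ≠ some "END" then lines ++ ["END"] else lines
    PySem.Str.join "\n" lines ++ "\n"

-- ===== PRECONDITION & SPEC =====
-- Pre_ excludes exactly the inputs on which Python A raises ValueError: texts with no line whose
-- 6-char record field strips to "ATOM" or "END" (both Pythons raise there).
def Pre_pdb_text_to_pdbqt (pdb_text : String) : Prop :=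
  ∃ l ∈ PySem.Str.splitlines pdb_text,
    PySem.Str.strip (PySem.Str.slice l (some 0) (some 6)) = "ATOM" ∨
    PySem.Str.strip (PySem.Str.slice l (some 0) (some 6)) = "END"
instance (pdb_text : String) : Decidable (Pre_pdb_text_to_pdbqt pdb_text) := by
  unfold Pre_pdb_text_to_pdbqt; infer_instance

def pvWitness_pdb_text_to_pdbqt : String := "ATOM      1  N   ALA A   1\nEND"

def Spec_pdb_text_to_pdbqt (pdb_text : String) (out : String) : Prop := out = pdb_text_to_pdbqt_alt pdb_text
instance (pdb_text : String) (out : String) : Decidable (Spec_pdb_text_to_pdbqt pdb_text out) := by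
  unfold Spec_pdb_text_to_pdbqt; infer_instance

-- ===== CLAIM (what is proved, stated in full; the proofs are below) =====
def Claim_equal_pdb_text_to_pdbqt : Prop := ∀ (pdb_text : String), Dom_pdb_text_to_pdbqt pdb_text → Pre_pdb_text_to_pdbqt pdb_text → Spec_pdb_text_to_pdbqt pdb_text (pdb_text_to_pdbqt pdb_text)

-- ===== LEMMAS AND PROOFS =====
-- A's loop result equals B's two-pass construction of `lines`, for any list of lines.
theorem pdbLoopA_eq (ls : List String) :
    pdbLoopA ls =
      (match pdbEndIdx ls with | none => ls | some i => ls.take i).filter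
        (fun l => PySem.Str.strip (PySem.Str.slice l (some 0) (some 6)) == "ATOM") ++
      (match pdbEndIdx ls with | none => ([] : List String) | some _ => ["END"]) := by
  induction ls with
  | nil => rfl
  | cons l ls ih =>
    by_cases hEnd : PySem.Str.strip (PySem.Str.slice l (some 0) (some 6)) = "END"
    · simp [pdbLoopA, pdbEndIdx, hEnd]
    · by_cases hAtom : PySem.Str.strip (PySem.Str.slice l (some 0) (some 6)) = "ATOM"
      · cases h : pdbEndIdx ls with
        | none => simp [pdbLoopA, pdbEndIdx, hAtom, ih, h]
        | some i => simp [pdbLoopA, pdbEndIdx, hAtom, ih, h]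
      · cases h : pdbEndIdx ls with
        | none => simp [pdbLoopA, pdbEndIdx, hEnd, hAtom, ih, h]
        | some i => simp [pdbLoopA, pdbEndIdx, hEnd, hAtom, ih, h]

-- ===== VERDICT (by name: the statement is the Claim_ definition above) =====
theorem pdb_text_to_pdbqt_spec : Claim_equal_pdb_text_to_pdbqt := by
  intro pdb_text _ _
  unfold Spec_pdb_text_to_pdbqt pdb_text_to_pdbqt pdb_text_to_pdbqt_alt
  rw [pdbLoopA_eq]
  cases h : pdbEndIdx (PySem.Str.splitlines pdb_text) <;> simp [h]
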